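-- pv_equiv track=rewrite | github.com/davidtorcivia/lutsmith | src/lutsmith/pipeline/solving.py | _determine_multigrid_schedule
-- ===== SOURCE A (Python) =====
-- def _determine_multigrid_schedule(N: int, coarse_size: int) -> list[int]:
--     """Determine coarse-to-fine grid sizes for multigrid solving.
--
--     Doubles (minus one) at each step until reaching N.
--     Examples: N=33, coarse=17 -> [17, 33]
--               N=65, coarse=17 -> [17, 33, 65]
--     """
--     if coarse_size >= N:
--         return [N]
--
--     schedule = []
--     size = coarse_size
--     while size < N:
--         schedule.append(size)
--         size = min(size * 2 - 1, N)
--     schedule.append(N)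
--     return schedule
-- ===== SOURCE B (Python) =====
-- def _determine_multigrid_schedule(N: int, coarse_size: int) -> list[int]:
--     if coarse_size >= N:
--         return [N]
--     # number of coarse levels: count of k >= 0 with (coarse_size-1)*2**k + 1 < N,
--     # i.e. 2**k <= (N-2)//(coarse_size-1), computed in closed form via bit_length
--     m = max(0, (N - 2) // (coarse_size - 1)).bit_length()
--     return [(coarse_size - 1) * 2 ** k + 1 for k in range(m)] + [N]
-- ===== Notes on version B (the rewrite author's own statement) =====
-- stated objective: alternative
-- what changed: B eliminates A's doubling while-loop entirely: it computes the number of coarse levels in closed form as max(0,(N-2)//(coarse_size-1)).bit_length() and then emits the schedule with a single comprehension over range(m).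
import Mathlib
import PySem

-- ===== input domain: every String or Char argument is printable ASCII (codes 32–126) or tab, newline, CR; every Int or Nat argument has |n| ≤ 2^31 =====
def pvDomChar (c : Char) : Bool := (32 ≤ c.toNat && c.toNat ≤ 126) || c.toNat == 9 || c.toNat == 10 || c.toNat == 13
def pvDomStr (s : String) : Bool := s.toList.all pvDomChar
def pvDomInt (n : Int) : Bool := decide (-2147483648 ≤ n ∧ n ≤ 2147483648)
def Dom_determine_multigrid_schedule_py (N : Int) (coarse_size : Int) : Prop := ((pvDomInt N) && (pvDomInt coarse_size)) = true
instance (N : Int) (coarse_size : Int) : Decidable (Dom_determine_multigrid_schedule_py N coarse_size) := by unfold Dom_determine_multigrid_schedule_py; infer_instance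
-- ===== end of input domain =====

-- B replaces A's doubling while-loop by a loop-free computation: the number of coarse
-- levels is obtained in closed form via integer division and bit_length, and the
-- schedule is then emitted by a comprehension over range(m).

-- ===== PORT A =====
-- A's while-loop over the mutable state (size, schedule); fuel only makes the
-- recursion total (fuel 0 returns like the loop exit; Pre_ guarantees it suffices).
def pyLoopA (N : Int) (fuel : Nat) (size : Int) (sched : List Int) : List Int :=
  match fuel with
  | 0 => sched ++ [N]
  | f + 1 =>
    if size < N then pyLoopA N f (min (size * 2 - 1) N) (sched ++ [size])
    else sched ++ [N]

def determine_multigrid_schedule_py (N : Int) (coarse_size : Int) : List Int :=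
  if coarse_size ≥ N then [N]
  else pyLoopA N (N - coarse_size).toNat coarse_size []

-- ===== PORT B =====
-- m = max(0, (N-2)//(coarse_size-1)).bit_length(); then the comprehension over range(m).
def determine_multigrid_schedule_py_alt (N : Int) (coarse_size : Int) : List Int :=
  if coarse_size ≥ N then [N]
  else
    let m : Nat := PySem.Int.bitLength (max 0 (PySem.Int.floordiv (N - 2) (coarse_size - 1)))
    ((List.range m).map (fun k => (coarse_size - 1) * 2 ^ k + 1)) ++ [N]

-- ===== PRECONDITION & SPEC =====
-- Pre_ excludes only coarse_size ≤ 1 < N, on which A loops forever (no return);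
-- B raises ZeroDivisionError at coarse_size = 1 and returns [N] for coarse_size ≤ 0 there.
def Pre_determine_multigrid_schedule_py (N : Int) (coarse_size : Int) : Prop :=
  N ≤ coarse_size ∨ 2 ≤ coarse_size
instance (N : Int) (coarse_size : Int) : Decidable (Pre_determine_multigrid_schedule_py N coarse_size) := by unfold Pre_determine_multigrid_schedule_py; infer_instance

def pvWitness_determine_multigrid_schedule_py : Int × Int := (65, 17)

def Spec_determine_multigrid_schedule_py (N : Int) (coarse_size : Int) (out : List Int) : Prop := out = determine_multigrid_schedule_py_alt N coarse_size
instance (N : Int) (coarse_size : Int) (out : List Int) : Decidable (Spec_determine_multigrid_schedule_py N coarse_size out) := by unfold Spec_determine_multigrid_schedule_py; infer_instance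

-- ===== CLAIM (what is proved, stated in full; the proofs are below) =====
def Claim_equal_determine_multigrid_schedule_py : Prop := ∀ (N : Int) (coarse_size : Int), Dom_determine_multigrid_schedule_py N coarse_size → Pre_determine_multigrid_schedule_py N coarse_size → Spec_determine_multigrid_schedule_py N coarse_size (determine_multigrid_schedule_py N coarse_size)

-- ===== LEMMAS AND PROOFS =====

lemma pow_ge_one (k : Nat) : (1 : Int) ≤ 2 ^ k := one_le_pow₀ (by norm_num)

-- A's loop started at state min ((c-1)*2^k+1) N produces the remaining tail of
-- the closed-form schedule, for any m bracketing N as in hlt/hge.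
lemma loopA_eq (N c : Int) (hc : 2 ≤ c) (m : Nat)
    (hlt : ∀ k, k < m → (c - 1) * 2 ^ k + 1 < N)
    (hge : N ≤ (c - 1) * 2 ^ m + 1) :
    ∀ (f k : Nat) (acc : List Int), k ≤ m →
      (N - min ((c - 1) * 2 ^ k + 1) N).toNat ≤ f →
      pyLoopA N f (min ((c - 1) * 2 ^ k + 1) N) acc
        = acc ++ ((List.range (m - k)).map (fun j => (c - 1) * 2 ^ (k + j) + 1)) ++ [N] := by
  intro f
  induction f with
  | zero =>
    intro k acc hk hf
    have hminle : min ((c - 1) * 2 ^ k + 1) N ≤ N := min_le_right _ _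
    have hNle : N ≤ min ((c - 1) * 2 ^ k + 1) N := by omega
    have hkm : k = m := by
      by_contra h
      have hklt : k < m := by omega
      have := hlt k hklt
      have : N ≤ (c - 1) * 2 ^ k + 1 := le_trans hNle (min_le_left _ _)
      omega
    subst hkm
    simp [pyLoopA]
  | succ f ih =>
    intro k acc hk hf
    have h2k : (1 : Int) ≤ 2 ^ k := pow_ge_one k
    by_cases hklt : k < m
    · have hcur : (c - 1) * 2 ^ k + 1 < N := hlt k hklt
      have hmin : min ((c - 1) * 2 ^ k + 1) N = (c - 1) * 2 ^ k + 1 := min_eq_left (by omega)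
      have hstep : ((c - 1) * 2 ^ k + 1) * 2 - 1 = (c - 1) * 2 ^ (k + 1) + 1 := by
        rw [pow_succ]; ring
      have hnext : (c - 1) * 2 ^ k + 2 ≤ min ((c - 1) * 2 ^ (k + 1) + 1) N := by
        have : (c - 1) * 2 ^ k + 1 + 1 ≤ (c - 1) * 2 ^ (k + 1) + 1 := by
          rw [pow_succ]; nlinarith
        omega
      have hfle : (N - min ((c - 1) * 2 ^ (k + 1) + 1) N).toNat ≤ f := by
        have hle : min ((c - 1) * 2 ^ (k + 1) + 1) N ≤ N := min_le_right _ _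
        omega
      rw [pyLoopA, hmin, if_pos hcur, hstep]
      have := ih (k + 1) (acc ++ [(c - 1) * 2 ^ k + 1]) (by omega) hfle
      rw [this]
      have hrange : m - k = (m - (k + 1)) + 1 := by omega
      rw [hrange, List.range_succ_eq_map, List.map_cons, List.map_map]
      have hfun : ((fun j => (c - 1) * 2 ^ (k + j) + 1) ∘ Nat.succ)
          = (fun j => (c - 1) * 2 ^ (k + 1 + j) + 1) := by
        funext j
        have : k + Nat.succ j = k + 1 + j := by omega
        simp [Function.comp, this]
      rw [hfun]
      simp
    · have hkm : k = m := by omega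
      have hmin : min ((c - 1) * 2 ^ k + 1) N = N := min_eq_right (by rw [hkm]; exact hge)
      rw [pyLoopA, hmin, if_neg (lt_irrefl N), hkm]
      simp

-- ===== VERDICT (by name: the statement is the Claim_ definition above) =====
theorem determine_multigrid_schedule_py_spec : Claim_equal_determine_multigrid_schedule_py := by
  intro N c _ hpre
  unfold Spec_determine_multigrid_schedule_py determine_multigrid_schedule_py determine_multigrid_schedule_py_alt
  by_cases hge : c ≥ N
  · simp [hge]
  · have hcN : c < N := lt_of_not_ge hge
    have hc : 2 ≤ c := by rcases hpre with h | h <;> omega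
    rw [if_neg hge, if_neg hge]
    set M0 : Int := PySem.Int.floordiv (N - 2) (c - 1) with hM0def
    have hd : (0 : Int) < c - 1 := by omega
    have hM1 : 1 ≤ M0 := by
      rw [hM0def, PySem.Int.le_floordiv_iff_mul_le hd]
      omega
    have hmax : max 0 M0 = M0 := max_eq_right (by omega)
    set m : Nat := PySem.Int.bitLength (max 0 M0) with hmdef
    have hmdef' : m = PySem.Int.bitLength M0 := by rw [hmdef, hmax]
    have hub : M0 < (2 : Int) ^ m := by
      have h1 := PySem.Int.lt_two_pow_bitLength M0
      rw [← hmdef'] at h1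
      have h2 : ((M0.natAbs : Nat) : Int) < ((2 ^ m : Nat) : Int) := by exact_mod_cast h1
      rwa [Int.natAbs_of_nonneg (by omega), Nat.cast_pow, Nat.cast_ofNat] at h2
    have hlb : (2 : Int) ^ (m - 1) ≤ M0 := by
      have h1 := PySem.Int.two_pow_bitLength_le M0 (by omega)
      rw [← hmdef'] at h1
      have h2 : ((2 ^ (m - 1) : Nat) : Int) ≤ ((M0.natAbs : Nat) : Int) := by exact_mod_cast h1
      rwa [Int.natAbs_of_nonneg (by omega), Nat.cast_pow, Nat.cast_ofNat] at h2
    have hMd : M0 * (c - 1) ≤ N - 2 :=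
      (PySem.Int.le_floordiv_iff_mul_le hd).mp (le_of_eq hM0def)
    have hNd : N - 2 < (M0 + 1) * (c - 1) :=
      (PySem.Int.floordiv_lt_iff_lt_mul hd).mp (by rw [← hM0def]; omega)
    have hm1 : 1 ≤ m := by
      by_contra h
      have hm0 : m = 0 := by omega
      rw [hm0] at hub
      norm_num at hub
      omega
    have hlt : ∀ k, k < m → (c - 1) * 2 ^ k + 1 < N := by
      intro k hk
      have hk1 : k ≤ m - 1 := by omega
      have hpow : (2 : Int) ^ k ≤ 2 ^ (m - 1) := pow_le_pow_right₀ (by norm_num) hk1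
      nlinarith
    have hge' : N ≤ (c - 1) * 2 ^ m + 1 := by nlinarith
    have hmin0 : min ((c - 1) * 2 ^ (0 : Nat) + 1) N = c := by
      have : (c - 1) * 2 ^ (0 : Nat) + 1 = c := by ring
      rw [this]; exact min_eq_left (le_of_lt hcN)
    have hmain := loopA_eq N c hc m hlt hge' (N - c).toNat 0 [] (by omega) (by rw [hmin0])
    rw [hmin0] at hmain
    rw [hmain]
    simp
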